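-- pv_equiv track=rewrite | github.com/joaopaulodevv/curriculum_generator | build.py | url_display
-- ===== SOURCE A (Python) =====
-- def url_display(url):
--     """Retorna versão de exibição da URL (sem protocolo)."""
--     if not url:
--         return None
--     url = str(url).strip()
--     for prefix in ['https://', 'http://']:
--         if url.startswith(prefix):
--             return url[len(prefix):]
--     return url
-- ===== SOURCE B (Python) =====
-- def url_display(url):
--     """Retorna versão de exibição da URL (sem protocolo)."""
--     if not url:
--         return None
--     url = str(url).strip()
--     scheme, sep, rest = url.partition('://')
--     if sep and scheme in ('http', 'https'):
--         return rest
--     return url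
-- ===== Notes on version B (the rewrite author's own statement) =====
-- stated objective: idiomatic
-- what changed: Replaced the two-iteration prefix loop (startswith plus manual slicing per prefix) with a single str.partition at the first occurrence of the scheme separator, keeping the tail only when the part before it is one of the two scheme names A checks.
import Mathlib
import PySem

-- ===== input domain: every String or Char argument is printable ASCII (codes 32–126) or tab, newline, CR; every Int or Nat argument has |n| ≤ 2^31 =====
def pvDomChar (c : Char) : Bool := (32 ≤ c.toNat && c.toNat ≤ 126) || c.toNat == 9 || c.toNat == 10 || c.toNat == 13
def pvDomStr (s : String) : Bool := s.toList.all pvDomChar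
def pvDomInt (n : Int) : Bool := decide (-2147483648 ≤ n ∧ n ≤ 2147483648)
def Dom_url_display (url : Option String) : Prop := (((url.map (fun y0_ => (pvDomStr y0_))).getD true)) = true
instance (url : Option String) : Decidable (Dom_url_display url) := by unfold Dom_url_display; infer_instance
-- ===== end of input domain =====

-- B replaces A's two-prefix startswith loop with a single str.partition at the first
-- scheme-separator occurrence plus a check of the scheme name; idiomatic, same results.


-- ===== PORT A =====
def url_display (url : Option String) : Option String :=
  match url with
  | none => none
  | some s =>
    if s = "" then none
    else
      let u := PySem.Str.strip s
      if PySem.Str.startswith u "https://" then some (PySem.Str.slice u (some 8) none)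
      else if PySem.Str.startswith u "http://" then some (PySem.Str.slice u (some 7) none)
      else some u

-- ===== PORT B =====
-- u.partition(separator) ported exactly: split at the FIRST occurrence (Str.find);
-- the separator component is nonempty iff find ≠ -1.
def url_display_alt (url : Option String) : Option String :=
  match url with
  | none => none
  | some s =>
    if s = "" then none
    else
      let u := PySem.Str.strip s
      let i := PySem.Str.find u "://"
      if i = -1 then some u
      else
        let scheme := PySem.Str.slice u none (some i)
        let rest := PySem.Str.slice u (some (i + 3)) none
        if scheme = "http" ∨ scheme = "https" then some rest else some u

-- ===== PRECONDITION & SPEC =====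
def Spec_url_display (url : Option String) (out : Option String) : Prop := out = url_display_alt url
instance (url : Option String) (out : Option String) : Decidable (Spec_url_display url out) := by unfold Spec_url_display; infer_instance

-- ===== CLAIM (what is proved, stated in full; the proofs are below) =====
def Claim_equal_url_display : Prop := ∀ (url : Option String), Dom_url_display url → Spec_url_display url (url_display url)

-- ===== LEMMAS AND PROOFS =====

-- the first separator occurrence in pre ++ sep ++ r sits right after pre when pre has no colon
lemma find_scheme (pre r : List Char) (hcolon : ':' ∉ pre) :
    PySem.Chars.find (pre ++ ':' :: '/' :: '/' :: r) [':', '/', '/'] = pre.length := by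
  set l := pre ++ ':' :: '/' :: '/' :: r with hl
  have hinf : [':', '/', '/'] <:+: l := ⟨pre, r, by simp [hl]⟩
  have h0 : 0 ≤ PySem.Chars.find l [':', '/', '/'] := (PySem.Chars.find_nonneg_iff _ _).2 hinf
  obtain ⟨hpre, hmin⟩ := PySem.Chars.find_spec (s := l) (sub := [':', '/', '/']) h0
  lift PySem.Chars.find l [':', '/', '/'] to ℕ using h0 with k hk
  simp only [Int.toNat_natCast] at hpre hmin
  have hkn : k ≤ pre.length := by
    by_contra hgt
    exact hmin pre.length (by omega) ⟨r, by simp [hl]⟩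
  have hkeq : k = pre.length := by
    by_contra hne
    have hklt : k < pre.length := by omega
    rcases hpre with ⟨t, ht⟩
    have hgk : l[k]? = some ':' := by
      have h00 : (List.drop k l)[0]? = some ':' := by rw [← ht]; rfl
      simpa using h00
    have hpk : pre[k]? = some ':' := by
      rw [hl, List.getElem?_append_left hklt] at hgk; exact hgk
    exact hcolon (List.mem_of_getElem? hpk)
  exact_mod_cast hkeq

-- where find points, the list decomposes as take k ++ separator ++ drop (k+3)
lemma decomp_of_find (l : List Char) (k : ℕ)
    (hk : PySem.Chars.find l [':', '/', '/'] = (k : Int)) :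
    l = l.take k ++ ':' :: '/' :: '/' :: l.drop (k + 3) := by
  have h0 : 0 ≤ PySem.Chars.find l [':', '/', '/'] := by rw [hk]; exact_mod_cast Nat.zero_le k
  obtain ⟨hpre, -⟩ := PySem.Chars.find_spec (s := l) (sub := [':', '/', '/']) h0
  rw [hk] at hpre
  simp only [Int.toNat_natCast] at hpre
  rcases hpre with ⟨t, ht⟩
  have hdrop : List.drop k l = ':' :: '/' :: '/' :: t := by simpa using ht.symm
  have ht' : t = List.drop (k + 3) l := by
    have : List.drop 3 (List.drop k l) = t := by rw [hdrop]; rfl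
    rw [← this, List.drop_drop]
  rw [← ht']
  conv_lhs => rw [← List.take_append_drop k l, hdrop]

-- the heart of the equivalence, one stripped string at a time
lemma core (u : String) :
    (if PySem.Str.startswith u "https://" then some (PySem.Str.slice u (some 8) none)
     else if PySem.Str.startswith u "http://" then some (PySem.Str.slice u (some 7) none)
     else some u)
    =
    (if PySem.Str.find u "://" = -1 then some u
     else if PySem.Str.slice u none (some (PySem.Str.find u "://")) = "http"
             ∨ PySem.Str.slice u none (some (PySem.Str.find u "://")) = "https" then
       some (PySem.Str.slice u (some (PySem.Str.find u "://" + 3)) none)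
     else some u) := by
  by_cases h1 : PySem.Str.startswith u "https://" = true
  · obtain ⟨r, hr⟩ : ∃ r, "https://".toList ++ r = u.toList := by
      have := h1; rw [PySem.Str.startswith_eq, PySem.Chars.startswith_iff] at this; exact this
    have hfind : PySem.Str.find u "://" = 5 := by
      rw [PySem.Str.find_eq]
      have := find_scheme "https".toList r (by decide)
      rw [show ("https".toList ++ ':' :: '/' :: '/' :: r) = u.toList from hr] at this
      simpa using this
    have hscheme : PySem.Str.slice u none (some 5) = "https" := by
      apply String.toList_inj.mp
      rw [PySem.Str.toList_slice, PySem.Chars.slice_eq_listSlice, PySem.List.slice_to _ (by norm_num)]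
      rw [← hr]; rfl
    simp only [h1, if_true, hfind, hscheme]
    norm_num
  · by_cases h2 : PySem.Str.startswith u "http://" = true
    · obtain ⟨r, hr⟩ : ∃ r, "http://".toList ++ r = u.toList := by
        have := h2; rw [PySem.Str.startswith_eq, PySem.Chars.startswith_iff] at this; exact this
      have hfind : PySem.Str.find u "://" = 4 := by
        rw [PySem.Str.find_eq]
        have := find_scheme "http".toList r (by decide)
        rw [show ("http".toList ++ ':' :: '/' :: '/' :: r) = u.toList from hr] at this
        simpa using this
      have hscheme : PySem.Str.slice u none (some 4) = "http" := by
        apply String.toList_inj.mp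
        rw [PySem.Str.toList_slice, PySem.Chars.slice_eq_listSlice, PySem.List.slice_to _ (by norm_num)]
        rw [← hr]; rfl
      simp only [h1, h2, Bool.not_eq_true] at *
      simp only [hfind, hscheme, if_true, if_false, Bool.false_eq_true]
      norm_num
    · by_cases hf : PySem.Str.find u "://" = -1
      · have h1' : PySem.Chars.startswith u.toList ['h','t','t','p','s',':','/','/'] = false := by
          simpa using h1
        have h2' : PySem.Chars.startswith u.toList ['h','t','t','p',':','/','/'] = false := by
          simpa using h2
        have hf' : PySem.Chars.find u.toList [':', '/', '/'] = -1 := by simpa using hf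
        simp [h1', h2', hf']
      · have h0 : 0 ≤ PySem.Str.find u "://" := by
          have := PySem.Chars.neg_one_le_find u.toList "://".toList
          rw [PySem.Str.find_eq]
          rw [PySem.Str.find_eq] at hf
          omega
        have hnot : ¬ (PySem.Str.slice u none (some (PySem.Str.find u "://")) = "http"
             ∨ PySem.Str.slice u none (some (PySem.Str.find u "://")) = "https") := by
          rintro (hs | hs) <;> {
            have hk0 := h0
            lift PySem.Str.find u "://" to ℕ using h0 with k hk
            have hkl : PySem.Chars.find u.toList [':', '/', '/'] = (k : Int) := by
              have := hk.symm; simpa using this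
            have htake := congrArg String.toList hs
            rw [PySem.Str.toList_slice, PySem.Chars.slice_eq_listSlice,
              PySem.List.slice_to _ (by omega)] at htake
            simp only [Int.toNat_natCast] at htake
            have hdec := decomp_of_find u.toList k hkl
            rw [htake] at hdec
            first
            | exact h2 (by
                rw [PySem.Str.startswith_eq, PySem.Chars.startswith_iff]
                exact ⟨u.toList.drop (k + 3), by simpa using hdec.symm⟩)
            | exact h1 (by
                rw [PySem.Str.startswith_eq, PySem.Chars.startswith_iff]
                exact ⟨u.toList.drop (k + 3), by simpa using hdec.symm⟩)
          }
        have h1' : PySem.Chars.startswith u.toList ['h','t','t','p','s',':','/','/'] = false := by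
          simpa using h1
        have h2' : PySem.Chars.startswith u.toList ['h','t','t','p',':','/','/'] = false := by
          simpa using h2
        have hf' : ¬ PySem.Chars.find u.toList [':', '/', '/'] = -1 := by simpa using hf
        simp only [not_or] at hnot
        obtain ⟨hn1, hn2⟩ := hnot
        simp at hn1 hn2
        simp [h1', h2', hf', hn1, hn2]

-- ===== VERDICT (by name: the statement is the Claim_ definition above) =====
theorem url_display_spec : Claim_equal_url_display := by
  intro url _
  unfold Spec_url_display url_display url_display_alt
  match url with
  | none => rfl
  | some s =>
    by_cases hs : s = ""
    · simp [hs]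
    · simp only [hs, if_false]
      exact core (PySem.Str.strip s)
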